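-- pv_equiv track=rewrite | github.com/HangLou/ARStack | code/vector_output.py | get_backbone_indices
-- ===== SOURCE A (Python) =====
-- def get_backbone_indices(sequence, overlapping_indices):
--     backbone_indices = []
--     oi_set = set(overlapping_indices)
--     current_end = 0
--     for atom_index in range(len(sequence)):
--         current_end += 3
--         if atom_index in oi_set:
--             for i in range(current_end-3, current_end):
--                 backbone_indices.append(i)
--
--     return backbone_indices
-- ===== SOURCE B (Python) =====
-- def get_backbone_indices(sequence, overlapping_indices):
--     n = len(sequence)
--     valid = sorted(set(i for i in overlapping_indices if 0 <= i < n))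
--     out = []
--     for idx in valid:
--         out.extend((3 * idx, 3 * idx + 1, 3 * idx + 2))
--     return out
-- ===== Notes on version B (the rewrite author's own statement) =====
-- stated objective: faster
-- what changed: Instead of scanning every residue position in range(len(sequence)) and maintaining a running end counter, B filters the overlapping indices to [0, len(sequence)), dedups and sorts them, and emits 3*idx, 3*idx+1, 3*idx+2 directly for each.
import Mathlib
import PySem

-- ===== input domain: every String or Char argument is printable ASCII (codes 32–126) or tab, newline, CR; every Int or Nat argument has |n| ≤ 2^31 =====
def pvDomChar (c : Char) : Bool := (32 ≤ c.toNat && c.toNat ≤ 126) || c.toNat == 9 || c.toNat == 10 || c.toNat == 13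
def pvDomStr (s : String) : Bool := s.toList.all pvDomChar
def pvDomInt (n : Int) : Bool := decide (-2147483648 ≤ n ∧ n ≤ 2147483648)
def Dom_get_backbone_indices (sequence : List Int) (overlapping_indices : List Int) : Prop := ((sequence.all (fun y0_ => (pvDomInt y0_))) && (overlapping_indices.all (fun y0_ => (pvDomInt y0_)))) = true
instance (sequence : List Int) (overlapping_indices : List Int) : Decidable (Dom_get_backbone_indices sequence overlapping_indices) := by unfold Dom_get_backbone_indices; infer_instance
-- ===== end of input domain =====

-- B replaces A's scan over every residue position with a filter/sort of the overlapping
-- indices, emitting 3*idx..3*idx+2 per kept index (asymptotically faster when the list of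
-- overlapping indices is short relative to the sequence).

-- ===== PORT A =====
def get_backbone_indices (sequence : List Int) (overlapping_indices : List Int) : List Int :=
  let oi_set : PySem.Set Int := PySem.Set.ofList overlapping_indices
  let r := (PySem.List.pyRange 0 (PySem.List.len sequence) 1).foldl
    (fun (st : List Int × Int) atom_index =>
      let current_end := st.2 + 3
      let backbone_indices :=
        if PySem.Set.contains oi_set atom_index then
          (PySem.List.pyRange (current_end - 3) current_end 1).foldl
            (fun acc i => acc ++ [i]) st.1
        else st.1
      (backbone_indices, current_end)) ([], 0)
  r.1

-- ===== PORT B =====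
def get_backbone_indices_alt (sequence : List Int) (overlapping_indices : List Int) : List Int :=
  let n := PySem.List.len sequence
  let valid := PySem.List.sorted
    (PySem.Set.ofList (overlapping_indices.filter (fun i => decide (0 ≤ i ∧ i < n))))
    (fun x => x) false
  valid.foldl (fun acc idx => acc ++ [3 * idx, 3 * idx + 1, 3 * idx + 2]) []

-- ===== PRECONDITION & SPEC =====
def Spec_get_backbone_indices (sequence : List Int) (overlapping_indices : List Int) (out : List Int) : Prop := out = get_backbone_indices_alt sequence overlapping_indices
instance (sequence : List Int) (overlapping_indices : List Int) (out : List Int) : Decidable (Spec_get_backbone_indices sequence overlapping_indices out) := by unfold Spec_get_backbone_indices; infer_instance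

-- ===== CLAIM (what is proved, stated in full; the proofs are below) =====
def Claim_equal_get_backbone_indices : Prop := ∀ (sequence : List Int) (overlapping_indices : List Int), Dom_get_backbone_indices sequence overlapping_indices → Spec_get_backbone_indices sequence overlapping_indices (get_backbone_indices sequence overlapping_indices)

-- ===== LEMMAS AND PROOFS =====

-- A's loop over range(a, b), carrying current_end = 3*a initially, appends the block
-- [3*i, 3*i+1, 3*i+2] for each i in the range that lies in S.
theorem loopA (S : PySem.Set Int) (k : Nat) : ∀ (a : Int) (acc : List Int),
    (b : Int) → (b - a).toNat = k →
    ((PySem.List.pyRange a b 1).foldl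
      (fun (st : List Int × Int) atom_index =>
        (if PySem.Set.contains S atom_index then
          (PySem.List.pyRange (st.2 + 3 - 3) (st.2 + 3) 1).foldl
            (fun acc i => acc ++ [i]) st.1
        else st.1, st.2 + 3)) (acc, 3 * a)).1
    = acc ++ ((PySem.List.pyRange a b 1).filter (fun i => PySem.Set.contains S i)).flatMap
        (fun i => [3 * i, 3 * i + 1, 3 * i + 2]) := by
  induction k with
  | zero =>
    intro a acc b hb
    have hba : b ≤ a := by omega
    simp [PySem.List.pyRange_one_eq_nil hba]
  | succ k ih =>
    intro a acc b hb
    have hab : a < b := by omega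
    rw [PySem.List.pyRange_one_cons hab]
    simp only [List.foldl_cons, List.filter_cons]
    have hrange : PySem.List.pyRange (3 * a + 3 - 3) (3 * a + 3) 1 = [3 * a, 3 * a + 1, 3 * a + 2] := by
      rw [show (3:Int) * a + 3 - 3 = 3 * a from by ring, PySem.List.pyRange_one]
      rw [show ((3 * a + 3 - 3 * a : Int)).toNat = 3 from by omega]
      simp [List.range_succ]
    have h2 : (3:Int) * a + 3 = 3 * (a + 1) := by ring
    by_cases hc : PySem.Set.contains S a
    · simp only [hc, if_pos, hrange]
      simp only [List.foldl_cons, List.foldl_nil, h2]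
      rw [ih (a + 1) (acc ++ [3 * a] ++ [3 * a + 1] ++ [3 * a + 2]) b (by omega)]
      simp
    · simp only [hc, Bool.false_eq_true, if_neg, not_false_iff, h2]
      rw [ih (a + 1) acc b (by omega)]

-- the index lists agree: range-filter (A) versus sorted set of valid overlapping indices (B)
theorem indices_eq (overlapping_indices : List Int) (n : Int) :
    (PySem.List.pyRange 0 n 1).filter
        (fun i => PySem.Set.contains (PySem.Set.ofList overlapping_indices) i)
    = PySem.List.sorted
        (PySem.Set.ofList (overlapping_indices.filter (fun i => decide (0 ≤ i ∧ i < n))))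
        (fun x => x) false := by
  apply Eq.symm
  apply PySem.List.sorted_eq_of_perm_of_pairwise_lt
  · rw [List.perm_ext_iff_of_nodup
      ((PySem.List.nodup_pyRange_one 0 n).filter _)
      (PySem.Set.nodup_ofList _)]
    intro x
    simp [PySem.Set.mem_ofList, PySem.List.mem_pyRange_one,
      List.mem_filter, and_comm]
  · exact (PySem.List.pairwise_lt_pyRange_one 0 n).filter _

-- ===== VERDICT (by name: the statement is the Claim_ definition above) =====
theorem get_backbone_indices_spec : Claim_equal_get_backbone_indices := by
  intro sequence overlapping_indices _
  show get_backbone_indices sequence overlapping_indices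
      = get_backbone_indices_alt sequence overlapping_indices
  unfold get_backbone_indices get_backbone_indices_alt
  simp only []
  rw [show (([], 0) : List Int × Int) = (([], 3 * 0) : List Int × Int) from by norm_num]
  rw [loopA (PySem.Set.ofList overlapping_indices)
      (PySem.List.len sequence - 0).toNat 0 [] (PySem.List.len sequence) rfl]
  rw [List.nil_append, indices_eq]
  rw [PySem.List.foldl_append_eq_flatMap (fun idx => [3 * idx, 3 * idx + 1, 3 * idx + 2])]
  rw [List.nil_append]
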